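-- pv_equiv track=rewrite | github.com/PavanAnganna90/OpsSight-DevOpsVisibilityPlatform | backend/app/utils/terraform_parser.py | _calculate_module_risk
-- ===== SOURCE A (Python) =====
-- from typing import Dict, List, Optional, Any, Tuple, Union
-- from enum import Enum
--
-- class RiskLevel(str, Enum):
--     """Risk level enumeration for infrastructure changes."""
--
--     LOW = "low"
--     MEDIUM = "medium"
--     HIGH = "high"
--     CRITICAL = "critical"
--
-- def _calculate_module_risk(resources: List[Dict[str, Any]]) -> RiskLevel:
--     """
--     Calculate overall risk level for a module based on its resources.
--
--     Args:
--         resources (List[Dict[str, Any]]): List of resource changes in module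
--
--     Returns:
--         RiskLevel: Module risk level
--     """
--     if not resources:
--         return RiskLevel.LOW
--
--     risk_levels = [resource["risk_level"] for resource in resources]
--
--     if RiskLevel.CRITICAL in risk_levels:
--         return RiskLevel.CRITICAL
--     elif RiskLevel.HIGH in risk_levels:
--         return RiskLevel.HIGH
--     elif RiskLevel.MEDIUM in risk_levels:
--         return RiskLevel.MEDIUM
--     else:
--         return RiskLevel.LOW
-- ===== SOURCE B (Python) =====
-- from enum import Enum
--
-- class RiskLevel(str, Enum):
--     LOW = "low"
--     MEDIUM = "medium"
--     HIGH = "high"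
--     CRITICAL = "critical"
--
-- _RANK = {RiskLevel.LOW: 0, RiskLevel.MEDIUM: 1, RiskLevel.HIGH: 2, RiskLevel.CRITICAL: 3}
-- _ORDER = [RiskLevel.LOW, RiskLevel.MEDIUM, RiskLevel.HIGH, RiskLevel.CRITICAL]
--
-- def _calculate_module_risk(resources):
--     if not resources:
--         return RiskLevel.LOW
--     best = 0
--     for resource in resources:
--         r = _RANK.get(resource["risk_level"], 0)
--         if r > best:
--             best = r
--     return _ORDER[best]
-- ===== Notes on version B (the rewrite author's own statement) =====
-- stated objective: idiomatic
-- what changed: Replaced the three separate membership scans over the extracted risk list with a single pass tracking the maximum rank from a RiskLevel->ordinal table, then indexing back into the canonical order list.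
import Mathlib
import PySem

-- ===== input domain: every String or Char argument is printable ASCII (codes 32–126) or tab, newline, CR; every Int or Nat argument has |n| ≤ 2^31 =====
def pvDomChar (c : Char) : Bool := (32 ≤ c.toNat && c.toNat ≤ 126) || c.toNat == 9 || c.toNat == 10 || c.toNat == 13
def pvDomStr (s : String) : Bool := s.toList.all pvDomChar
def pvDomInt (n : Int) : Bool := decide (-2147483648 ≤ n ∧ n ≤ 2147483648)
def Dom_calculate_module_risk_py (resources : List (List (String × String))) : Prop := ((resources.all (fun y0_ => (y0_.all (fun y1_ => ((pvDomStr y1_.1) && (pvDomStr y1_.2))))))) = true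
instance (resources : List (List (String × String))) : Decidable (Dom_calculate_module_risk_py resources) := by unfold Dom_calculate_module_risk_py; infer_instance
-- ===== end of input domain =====

-- B replaces A's three sequential membership scans by one single-pass maximum of ranks (idiomatic; same asymptotic cost).

-- ===== PORT A =====
-- resource["risk_level"]: first-match assoc-list lookup; KeyError (missing key) is excluded by Pre_, so the getD "" default is unreachable inside Pre_.
def pvLookupRL (r : List (String × String)) : String :=
  ((r.find? (fun p => p.1 == "risk_level")).map Prod.snd).getD ""

-- A: if not resources → "low"; extract risk_level values; then chain of membership tests.
def calculate_module_risk_py (resources : List (List (String × String))) : String :=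
  if resources.isEmpty then "low"
  else
    let risk_levels := resources.map pvLookupRL
    if risk_levels.contains "critical" then "critical"
    else if risk_levels.contains "high" then "high"
    else if risk_levels.contains "medium" then "medium"
    else "low"

-- ===== PORT B =====
def pvRankDict : List (String × Nat) := [("low", 0), ("medium", 1), ("high", 2), ("critical", 3)]
def pvOrderList : List String := ["low", "medium", "high", "critical"]

-- rank.get(v, 0) on the literal rank table
def pvRank (s : String) : Nat :=
  ((pvRankDict.find? (fun p => p.1 == s)).map Prod.snd).getD 0

-- B: single pass tracking the maximum rank, then index back into the canonical order list.
def calculate_module_risk_py_alt (resources : List (List (String × String))) : String :=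
  if resources.isEmpty then "low"
  else
    let best := resources.foldl
      (fun best r =>
        let v := pvRank (pvLookupRL r)
        if v > best then v else best) 0
    pvOrderList.getD best "low"

-- ===== PRECONDITION & SPEC =====
-- Pre_ excludes exactly the inputs where A raises KeyError: some resource dict lacks the "risk_level" key.
def Pre_calculate_module_risk_py (resources : List (List (String × String))) : Prop :=
  ∀ r ∈ resources, "risk_level" ∈ r.map Prod.fst
instance (resources : List (List (String × String))) : Decidable (Pre_calculate_module_risk_py resources) := by unfold Pre_calculate_module_risk_py; infer_instance
def pvWitness_calculate_module_risk_py : (List (List (String × String))) := [[("risk_level", "high")], [("risk_level", "low")]]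

def Spec_calculate_module_risk_py (resources : List (List (String × String))) (out : String) : Prop := out = calculate_module_risk_py_alt resources
instance (resources : List (List (String × String))) (out : String) : Decidable (Spec_calculate_module_risk_py resources out) := by unfold Spec_calculate_module_risk_py; infer_instance

-- ===== CLAIM (what is proved, stated in full; the proofs are below) =====
def Claim_equal_calculate_module_risk_py : Prop := ∀ (resources : List (List (String × String))), Dom_calculate_module_risk_py resources → Pre_calculate_module_risk_py resources → Spec_calculate_module_risk_py resources (calculate_module_risk_py resources)

-- ===== LEMMAS AND PROOFS =====

lemma pvRank_cases (s : String) :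
    pvRank s = (if s = "critical" then 3 else if s = "high" then 2 else if s = "medium" then 1 else 0) := by
  unfold pvRank pvRankDict
  by_cases hl : s = "low" <;> by_cases hm : s = "medium" <;>
    by_cases hh : s = "high" <;> by_cases hc : s = "critical" <;>
    simp_all [List.find?, eq_comm]
  have e1 : ("low" == s) = false := beq_eq_false_iff_ne.mpr (Ne.symm hl)
  have e2 : ("medium" == s) = false := beq_eq_false_iff_ne.mpr (Ne.symm hm)
  have e3 : ("high" == s) = false := beq_eq_false_iff_ne.mpr (Ne.symm hh)
  have e4 : ("critical" == s) = false := beq_eq_false_iff_ne.mpr (Ne.symm hc)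
  simp [e1, e2, e3, e4]

lemma pvRank_le (s : String) : pvRank s ≤ 3 := by
  rw [pvRank_cases]; split_ifs <;> omega

lemma pvRank_eq_three (s : String) : pvRank s = 3 ↔ s = "critical" := by
  rw [pvRank_cases]; split_ifs <;> simp_all

lemma pvRank_ge_two (s : String) : 2 ≤ pvRank s ↔ s = "critical" ∨ s = "high" := by
  rw [pvRank_cases]; split_ifs <;> simp_all

lemma pvRank_ge_one (s : String) : 1 ≤ pvRank s ↔ s = "critical" ∨ s = "high" ∨ s = "medium" := by
  rw [pvRank_cases]; split_ifs <;> simp_all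

def pvMaxRank (resources : List (List (String × String))) : Nat :=
  resources.foldl (fun best r => max best (pvRank (pvLookupRL r))) 0

lemma foldl_max_acc (l : List (List (String × String))) (acc : Nat) :
    l.foldl (fun best r => max best (pvRank (pvLookupRL r))) acc = max acc (pvMaxRank l) := by
  induction l generalizing acc with
  | nil => simp [pvMaxRank]
  | cons x xs ih =>
    simp only [pvMaxRank, List.foldl_cons] at *
    rw [ih, ih (max 0 _)]
    omega

-- B's fold (with the if) is the same as the max-fold
lemma foldl_rank_acc (resources : List (List (String × String))) (acc : Nat) :
    resources.foldl
      (fun best r =>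
        let v := pvRank (pvLookupRL r)
        if v > best then v else best) acc
    = max acc (pvMaxRank resources) := by
  have hfun : (fun (best : Nat) (r : List (String × String)) =>
      let v := pvRank (pvLookupRL r); if v > best then v else best)
      = (fun best r => max best (pvRank (pvLookupRL r))) := by
    funext b r
    dsimp only
    split_ifs <;> omega
  rw [hfun, foldl_max_acc]

lemma pvMaxRank_cons (r : List (String × String)) (rs : List (List (String × String))) :
    pvMaxRank (r :: rs) = max (pvRank (pvLookupRL r)) (pvMaxRank rs) := by
  simp only [pvMaxRank, List.foldl_cons]
  rw [foldl_max_acc]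
  simp [pvMaxRank]

lemma pvMaxRank_le (resources : List (List (String × String))) : pvMaxRank resources ≤ 3 := by
  induction resources with
  | nil => simp [pvMaxRank]
  | cons r rs ih =>
    rw [pvMaxRank_cons]
    have := pvRank_le (pvLookupRL r)
    omega

lemma le_pvMaxRank (k : Nat) (resources : List (List (String × String))) (hk : 1 ≤ k) :
    k ≤ pvMaxRank resources ↔ ∃ r ∈ resources, k ≤ pvRank (pvLookupRL r) := by
  induction resources with
  | nil => simp [pvMaxRank]; omega
  | cons r rs ih =>
    rw [pvMaxRank_cons]
    simp only [List.mem_cons]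
    constructor
    · intro h
      by_cases h1 : k ≤ pvRank (pvLookupRL r)
      · exact ⟨r, Or.inl rfl, h1⟩
      · have : k ≤ pvMaxRank rs := by omega
        obtain ⟨x, hx, hxk⟩ := ih.mp this
        exact ⟨x, Or.inr hx, hxk⟩
    · rintro ⟨x, hx | hx, hxk⟩
      · subst hx; omega
      · have := ih.mpr ⟨x, hx, hxk⟩; omega

theorem calculate_module_risk_py_spec : Claim_equal_calculate_module_risk_py := by
  intro resources _ _
  unfold Spec_calculate_module_risk_py calculate_module_risk_py calculate_module_risk_py_alt
  by_cases hemp : resources.isEmpty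
  · simp [hemp]
  · simp only [hemp, if_false, Bool.false_eq_true]
    rw [foldl_rank_acc]
    simp only [Nat.zero_max]
    have hle := pvMaxRank_le resources
    have h3 := le_pvMaxRank 3 resources (by omega)
    have h2 := le_pvMaxRank 2 resources (by omega)
    have h1 := le_pvMaxRank 1 resources (by omega)
    by_cases hc : ∃ r ∈ resources, pvLookupRL r = "critical"
    · obtain ⟨r, hr, hrv⟩ := hc
      have hcE : ∃ a ∈ resources, pvLookupRL a = "critical" := ⟨r, hr, hrv⟩
      have : 3 ≤ pvMaxRank resources :=
        h3.mpr ⟨r, hr, by rw [hrv]; rw [pvRank_cases]; simp⟩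
      have hM : pvMaxRank resources = 3 := by omega
      simp [hcE, hM, pvOrderList]
    · have hncrit : ∀ r ∈ resources, pvLookupRL r ≠ "critical" := by
        intro r hr h; exact hc ⟨r, hr, h⟩
      have hn3 : ¬ 3 ≤ pvMaxRank resources := by
        intro h
        obtain ⟨x, hx, hxk⟩ := h3.mp h
        have := pvRank_le (pvLookupRL x)
        exact hncrit x hx ((pvRank_eq_three _).mp (by omega))
      by_cases hh : ∃ r ∈ resources, pvLookupRL r = "high"
      · obtain ⟨r, hr, hrv⟩ := hh
        have hhE : ∃ a ∈ resources, pvLookupRL a = "high" := ⟨r, hr, hrv⟩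
        have : 2 ≤ pvMaxRank resources :=
          h2.mpr ⟨r, hr, by rw [hrv, pvRank_ge_two]; right; rfl⟩
        have hM : pvMaxRank resources = 2 := by omega
        simp [hc, hhE, hM, pvOrderList]
      · have hnhigh : ∀ r ∈ resources, pvLookupRL r ≠ "high" := by
          intro r hr h; exact hh ⟨r, hr, h⟩
        have hn2 : ¬ 2 ≤ pvMaxRank resources := by
          intro h
          obtain ⟨x, hx, hxk⟩ := h2.mp h
          rcases (pvRank_ge_two _).mp hxk with h' | h'
          · exact hncrit x hx h'
          · exact hnhigh x hx h'
        by_cases hm : ∃ r ∈ resources, pvLookupRL r = "medium"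
        · obtain ⟨r, hr, hrv⟩ := hm
          have hmE : ∃ a ∈ resources, pvLookupRL a = "medium" := ⟨r, hr, hrv⟩
          have : 1 ≤ pvMaxRank resources :=
            h1.mpr ⟨r, hr, by rw [hrv, pvRank_ge_one]; right; right; rfl⟩
          have hM : pvMaxRank resources = 1 := by omega
          simp [hc, hh, hmE, hM, pvOrderList]
        · have hnmed : ∀ r ∈ resources, pvLookupRL r ≠ "medium" := by
            intro r hr h; exact hm ⟨r, hr, h⟩
          have hn1 : ¬ 1 ≤ pvMaxRank resources := by
            intro h
            obtain ⟨x, hx, hxk⟩ := h1.mp h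
            rcases (pvRank_ge_one _).mp hxk with h' | h' | h'
            · exact hncrit x hx h'
            · exact hnhigh x hx h'
            · exact hnmed x hx h'
          have hM : pvMaxRank resources = 0 := by omega
          simp [hc, hh, hm, hM, pvOrderList]
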